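-- pv_equiv track=rewrite | github.com/AndresMaldonado200338/GrammarValidator | validators/hierarchy_validator.py | is_type3
-- ===== SOURCE A (Python) =====
-- def is_type3(productions):
--     """
--     Valida si las producciones de la gramática son de tipo 3 (gramática regular).
--     Argumento:
--     productions: Diccionario donde las claves son los no terminales (izquierda de la producción)
--                  y los valores son listas de las posibles producciones (derecha de la producción).
--     Retorno:
--     True si la gramática es de tipo 3, False si no lo es.
--     """
--     left_right = None
--
--     for left, rights in productions.items():
--         if not (len(left) == 1 and left.isupper()):
--             return False
--
--         for right in rights:
--             if len(right) == 1 and right.islower():  # A -> a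
--                 continue
--             elif len(right) == 2 and right[0].islower() and right[1].isupper():  # A -> aB
--                 if left_right is None:
--                     left_right = "right"
--                 elif left_right == "left":
--                     return False
--             elif len(right) == 2 and right[0].isupper() and right[1].islower():  # A -> Ba
--                 if left_right is None:
--                     left_right = "left"
--                 elif left_right == "right":
--                     return False
--             else:
--                 return False
--     return True
-- ===== SOURCE B (Python) =====
-- def is_type3(productions):
--     """Stateless declarative check: every left side is a single uppercase
--     letter, and the flattened right-hand sides are either all
--     terminal-or-right-linear or all terminal-or-left-linear."""
--     def terminal(r):
--         return len(r) == 1 and r.islower()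
--
--     def right_linear(r):
--         return len(r) == 2 and r[0].islower() and r[1].isupper()
--
--     def left_linear(r):
--         return len(r) == 2 and r[0].isupper() and r[1].islower()
--
--     if not all(len(left) == 1 and left.isupper() for left in productions):
--         return False
--     rhs = [r for rights in productions.values() for r in rights]
--     return (all(terminal(r) or right_linear(r) for r in rhs)
--             or all(terminal(r) or left_linear(r) for r in rhs))
-- ===== Notes on version B (the rewrite author's own statement) =====
-- stated objective: simpler
-- what changed: Replaces A's stateful single pass (left_right sentinel with mid-loop conflict returns) by a stateless declarative check: all left sides are single uppercase letters, and the flattened list of right-hand sides is either entirely terminal-or-right-linear or entirely terminal-or-left-linear.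
import Mathlib
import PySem

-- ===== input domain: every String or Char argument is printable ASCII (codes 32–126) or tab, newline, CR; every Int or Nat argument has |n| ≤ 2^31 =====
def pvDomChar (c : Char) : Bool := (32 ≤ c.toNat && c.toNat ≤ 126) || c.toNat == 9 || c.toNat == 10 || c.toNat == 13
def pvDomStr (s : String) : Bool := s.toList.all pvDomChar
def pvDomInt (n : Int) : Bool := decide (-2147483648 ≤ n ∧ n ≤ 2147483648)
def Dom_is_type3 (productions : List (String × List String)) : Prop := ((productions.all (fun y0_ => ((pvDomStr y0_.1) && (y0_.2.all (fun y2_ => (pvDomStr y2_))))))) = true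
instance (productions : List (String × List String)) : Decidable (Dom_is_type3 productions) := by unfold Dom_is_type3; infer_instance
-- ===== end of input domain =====

-- B drops A's stateful pass (left_right sentinel, mid-loop conflict returns) for a
-- stateless declarative check: lefts all valid, and the flattened right-hand sides
-- are all terminal-or-right-linear or all terminal-or-left-linear (simpler; same cost).

-- ===== PORT A =====
-- inner 'for right in rights' loop; none = 'return False', some lr = fall through with state lr
def isT3InnerA (lr : Option String) : List String → Option (Option String)
  | [] => some lr
  | right :: rest =>
    match right.toList with
    | [c] =>
      if PySem.Chars.islower c then isT3InnerA lr rest else none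
    | [c0, c1] =>
      if PySem.Chars.islower c0 && PySem.Chars.isupper c1 then
        match lr with
        | none => isT3InnerA (some "right") rest
        | some d => if d == "left" then none else isT3InnerA (some d) rest
      else if PySem.Chars.isupper c0 && PySem.Chars.islower c1 then
        match lr with
        | none => isT3InnerA (some "left") rest
        | some d => if d == "right" then none else isT3InnerA (some d) rest
      else none
    | _ => none

-- outer 'for left, rights in productions.items()' loop
def isT3OuterA (lr : Option String) : List (String × List String) → Bool
  | [] => true
  | (left, rights) :: rest =>
    -- 'len(left) == 1 and left.isupper()' (exact for the ASCII domain: a 1-char string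
    -- is isupper iff its character is an uppercase letter)
    if !(match left.toList with | [c] => PySem.Chars.isupper c | _ => false) then false
    else
      match isT3InnerA lr rights with
      | none => false
      | some lr' => isT3OuterA lr' rest

def is_type3 (productions : List (String × List String)) : Bool :=
  isT3OuterA none productions

-- ===== PORT B =====
-- Source B's helper predicates (exact on the ASCII domain)
def pvTerm (r : String) : Bool :=
  match r.toList with | [c] => PySem.Chars.islower c | _ => false
def pvRLin (r : String) : Bool :=
  match r.toList with | [c0, c1] => PySem.Chars.islower c0 && PySem.Chars.isupper c1 | _ => false
def pvLLin (r : String) : Bool :=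
  match r.toList with | [c0, c1] => PySem.Chars.isupper c0 && PySem.Chars.islower c1 | _ => false
def pvLeftOK (l : String) : Bool :=
  match l.toList with | [c] => PySem.Chars.isupper c | _ => false

def is_type3_alt (productions : List (String × List String)) : Bool :=
  if !(productions.all (fun p => pvLeftOK p.1)) then false
  else
    let rhs := productions.flatMap (fun p => p.2)
    (rhs.all (fun r => pvTerm r || pvRLin r)) || (rhs.all (fun r => pvTerm r || pvLLin r))

-- ===== PRECONDITION & SPEC =====
def Spec_is_type3 (productions : List (String × List String)) (out : Bool) : Prop := out = is_type3_alt productions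
instance (productions : List (String × List String)) (out : Bool) : Decidable (Spec_is_type3 productions out) := by unfold Spec_is_type3; infer_instance

-- ===== CLAIM (what is proved, stated in full; the proofs are below) =====
def Claim_equal_is_type3 : Prop := ∀ (productions : List (String × List String)), Dom_is_type3 productions → Spec_is_type3 productions (is_type3 productions)

-- ===== LEMMAS AND PROOFS =====

theorem lower_not_upper (c : Char) (h : PySem.Chars.islower c = true) :
    PySem.Chars.isupper c = false := by
  simp only [PySem.Chars.islower, PySem.Chars.isupper, Bool.and_eq_true, decide_eq_true_eq] at *
  obtain ⟨h1, h2⟩ := h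
  rw [Bool.eq_false_iff]
  intro hc
  simp only [Bool.and_eq_true, decide_eq_true_eq] at hc
  have a1 := UInt32.le_iff_toNat_le.mp (Char.le_def.mp h1)
  have a2 := UInt32.le_iff_toNat_le.mp (Char.le_def.mp hc.2)
  simp at a1 a2
  omega

theorem upper_not_lower (c : Char) (h : PySem.Chars.isupper c = true) :
    PySem.Chars.islower c = false := by
  rw [Bool.eq_false_iff]
  intro hl
  exact absurd h (by simp [lower_not_upper c hl])

-- fold A's inline left-side check into B's pvLeftOK (definitionally equal)
theorem leftOK_fold (l : String) :
    (match l.toList with | [c] => PySem.Chars.isupper c | _ => false) = pvLeftOK l := rfl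

-- A's inner loop already committed to "right": succeeds (state unchanged) iff all rights are terminal-or-right-linear
theorem innerA_right (rights : List String) :
    isT3InnerA (some "right") rights =
      if rights.all (fun r => pvTerm r || pvRLin r) then some (some "right") else none := by
  induction rights with
  | nil => simp [isT3InnerA]
  | cons right rest ih =>
    simp only [isT3InnerA, List.all_cons]
    rcases hm : right.toList with _ | ⟨c0, _ | ⟨c1, _ | _⟩⟩
    · simp [pvTerm, pvRLin, hm]
    · cases hc : PySem.Chars.islower c0
      · simp [pvTerm, pvRLin, hm, hc]
      · simp [pvTerm, pvRLin, hm, hc, ih]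
    · cases h1 : (PySem.Chars.islower c0 && PySem.Chars.isupper c1)
      · cases h2 : (PySem.Chars.isupper c0 && PySem.Chars.islower c1)
        · simp [pvTerm, pvRLin, hm, h1, h2]
        · simp [pvTerm, pvRLin, hm, h1, h2]
      · simp [pvTerm, pvRLin, hm, h1, ih]
    · simp [pvTerm, pvRLin, hm]

theorem innerA_left (rights : List String) :
    isT3InnerA (some "left") rights =
      if rights.all (fun r => pvTerm r || pvLLin r) then some (some "left") else none := by
  induction rights with
  | nil => simp [isT3InnerA]
  | cons right rest ih =>
    simp only [isT3InnerA, List.all_cons]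
    rcases hm : right.toList with _ | ⟨c0, _ | ⟨c1, _ | _⟩⟩
    · simp [pvTerm, pvLLin, hm]
    · cases hc : PySem.Chars.islower c0
      · simp [pvTerm, pvLLin, hm, hc]
      · simp [pvTerm, pvLLin, hm, hc, ih]
    · cases h1 : (PySem.Chars.islower c0 && PySem.Chars.isupper c1)
      · cases h2 : (PySem.Chars.isupper c0 && PySem.Chars.islower c1)
        · simp [pvTerm, pvLLin, hm, h1, h2]
        · simp [pvTerm, pvLLin, hm, h1, h2, ih]
      · -- head is right-linear: A rejects ("left" stays and sees aB); B-side: head fails (not terminal, not left-linear)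
        have hl0 : PySem.Chars.islower c0 = true := ((Bool.and_eq_true _ _).mp h1).1
        simp [pvTerm, pvLLin, hm, h1, lower_not_upper c0 hl0]
    · simp [pvTerm, pvLLin, hm]

-- A's inner loop from the undecided state
theorem innerA_none (rights : List String) :
    isT3InnerA none rights =
      if rights.all pvTerm then some none
      else if rights.all (fun r => pvTerm r || pvRLin r) then some (some "right")
      else if rights.all (fun r => pvTerm r || pvLLin r) then some (some "left")
      else none := by
  induction rights with
  | nil => simp [isT3InnerA]
  | cons right rest ih =>
    simp only [isT3InnerA, List.all_cons]
    rcases hm : right.toList with _ | ⟨c0, _ | ⟨c1, _ | _⟩⟩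
    · simp [pvTerm, pvRLin, pvLLin, hm]
    · cases hc : PySem.Chars.islower c0
      · simp [pvTerm, pvRLin, pvLLin, hm, hc]
      · simp [pvTerm, pvRLin, pvLLin, hm, hc, ih]
    · cases h1 : (PySem.Chars.islower c0 && PySem.Chars.isupper c1)
      · cases h2 : (PySem.Chars.isupper c0 && PySem.Chars.islower c1)
        · simp [pvTerm, pvRLin, pvLLin, hm, h1, h2]
        · have hu0 : PySem.Chars.isupper c0 = true := ((Bool.and_eq_true _ _).mp h2).1
          simp [pvTerm, pvRLin, pvLLin, hm, h2, innerA_left, upper_not_lower c0 hu0]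
      · have hl0 : PySem.Chars.islower c0 = true := ((Bool.and_eq_true _ _).mp h1).1
        simp [pvTerm, pvRLin, pvLLin, hm, h1, innerA_right, lower_not_upper c0 hl0]
    · simp [pvTerm, pvRLin, pvLLin, hm]

-- A's outer loop after committing to a direction
theorem outerA_right (prods : List (String × List String)) :
    isT3OuterA (some "right") prods =
      (prods.all (fun p => pvLeftOK p.1) &&
        (prods.flatMap (fun p => p.2)).all (fun r => pvTerm r || pvRLin r)) := by
  induction prods with
  | nil => simp [isT3OuterA]
  | cons p rest ih =>
    obtain ⟨left, rights⟩ := p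
    simp only [isT3OuterA, innerA_right, leftOK_fold, List.all_cons, List.flatMap_cons,
      List.all_append]
    cases hl : pvLeftOK left
    · simp
    · cases hr : rights.all (fun r => pvTerm r || pvRLin r)
      · simp
      · simp [ih]

theorem outerA_left (prods : List (String × List String)) :
    isT3OuterA (some "left") prods =
      (prods.all (fun p => pvLeftOK p.1) &&
        (prods.flatMap (fun p => p.2)).all (fun r => pvTerm r || pvLLin r)) := by
  induction prods with
  | nil => simp [isT3OuterA]
  | cons p rest ih =>
    obtain ⟨left, rights⟩ := p
    simp only [isT3OuterA, innerA_left, leftOK_fold, List.all_cons, List.flatMap_cons,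
      List.all_append]
    cases hl : pvLeftOK left
    · simp
    · cases hr : rights.all (fun r => pvTerm r || pvLLin r)
      · simp
      · simp [ih]

-- a right-hand side that is both (terminal or right-linear) and (terminal or left-linear) is terminal
theorem RL_imp_term (r : String) (hR : (pvTerm r || pvRLin r) = true)
    (hL : (pvTerm r || pvLLin r) = true) : pvTerm r = true := by
  rcases Bool.or_eq_true_iff.mp hR with h | h
  · exact h
  · rcases Bool.or_eq_true_iff.mp hL with h' | h'
    · exact h'
    · simp only [pvRLin] at h
      simp only [pvLLin] at h'
      rcases hm : r.toList with _ | ⟨c0, _ | ⟨c1, _ | _⟩⟩ <;> simp [hm] at h h'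
      exact absurd h'.1 (by simp [lower_not_upper c0 h.1])

-- A's outer loop from the undecided state computes B's declarative condition
theorem outerA_none (prods : List (String × List String)) :
    isT3OuterA none prods =
      (prods.all (fun p => pvLeftOK p.1) &&
        ((prods.flatMap (fun p => p.2)).all (fun r => pvTerm r || pvRLin r) ||
         (prods.flatMap (fun p => p.2)).all (fun r => pvTerm r || pvLLin r))) := by
  induction prods with
  | nil => simp [isT3OuterA]
  | cons p rest ih =>
    obtain ⟨left, rights⟩ := p
    simp only [isT3OuterA, innerA_none, leftOK_fold, List.all_cons, List.flatMap_cons,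
      List.all_append]
    cases hl : pvLeftOK left
    · simp
    · by_cases hT : rights.all pvTerm = true
      · have hRr : rights.all (fun r => pvTerm r || pvRLin r) = true := by
          rw [List.all_eq_true] at hT ⊢; exact fun r hr => by simp [hT r hr]
        have hLr : rights.all (fun r => pvTerm r || pvLLin r) = true := by
          rw [List.all_eq_true] at hT ⊢; exact fun r hr => by simp [hT r hr]
        simp [hT, hRr, hLr, ih]
      · rw [Bool.not_eq_true] at hT
        by_cases hR : rights.all (fun r => pvTerm r || pvRLin r) = true
        · have hLr : rights.all (fun r => pvTerm r || pvLLin r) = false := by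
            rw [Bool.eq_false_iff]
            intro hL
            rw [List.all_eq_true] at hR hL
            have : rights.all pvTerm = true := by
              rw [List.all_eq_true]; exact fun r hr => RL_imp_term r (hR r hr) (hL r hr)
            simp [this] at hT
          simp [hT, hR, hLr, outerA_right]
        · rw [Bool.not_eq_true] at hR
          by_cases hLc : rights.all (fun r => pvTerm r || pvLLin r) = true
          · simp [hT, hR, hLc, outerA_left]
          · rw [Bool.not_eq_true] at hLc
            simp [hT, hR, hLc]

-- ===== VERDICT (by name: the statement is the Claim_ definition above) =====
theorem is_type3_spec : Claim_equal_is_type3 := by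
  intro productions _
  unfold Spec_is_type3 is_type3 is_type3_alt
  rw [outerA_none]
  cases hl : productions.all (fun p => pvLeftOK p.1) <;> simp
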